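-- pv_equiv track=rewrite | github.com/gebgebgeb/itg-difficulty | parse.py | parse_measures
-- ===== SOURCE A (Python) =====
-- def remove_comment(line):
--     return line.split('//')[0].strip()
--
-- def parse_measures(lines):
--     measures = []
--     cur_measure = []
--     for line in lines:
--         line = remove_comment(line)
--         if line == ',':
--             measures.append(cur_measure)
--             cur_measure = []
--         else:
--             cur_measure.append(line)
--     return measures
-- ===== SOURCE B (Python) =====
-- def remove_comment(line):
--     return line.split('//')[0].strip()
--
-- def parse_measures(lines):
--     cleaned = [remove_comment(l) for l in lines]
--     measures = []
--     start = 0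
--     for i, c in enumerate(cleaned):
--         if c == ',':
--             measures.append(cleaned[start:i])
--             start = i + 1
--     return measures
-- ===== Notes on version B (the rewrite author's own statement) =====
-- stated objective: alternative
-- what changed: B first cleans all lines in one pass, then collects measures by maintaining a boundary index and slicing cleaned[start:i] at each comma, instead of growing an element-by-element accumulator list.
import Mathlib
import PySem

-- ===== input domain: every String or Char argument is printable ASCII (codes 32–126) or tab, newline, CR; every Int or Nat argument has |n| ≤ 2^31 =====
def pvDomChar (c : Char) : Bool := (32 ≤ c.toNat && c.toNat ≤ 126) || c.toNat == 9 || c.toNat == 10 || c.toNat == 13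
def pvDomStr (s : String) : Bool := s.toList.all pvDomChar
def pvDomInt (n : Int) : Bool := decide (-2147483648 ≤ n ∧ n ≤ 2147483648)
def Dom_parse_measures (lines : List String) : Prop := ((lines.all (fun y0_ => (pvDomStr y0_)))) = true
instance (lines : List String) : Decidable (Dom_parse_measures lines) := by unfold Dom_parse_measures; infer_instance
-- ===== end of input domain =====

-- B collects measures by boundary indices and slicing a pre-cleaned list instead of
-- A's element-by-element accumulator; objective: alternative decomposition, same cost.

-- ===== PORT A =====
-- line.split('//')[0].strip()  ([0] always exists: split with a nonempty sep is nonempty)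
def remove_comment (line : String) : String :=
  PySem.Str.strip (((PySem.Str.split? line "//").getD []).headD "")

def parse_measures (lines : List String) : List (List String) :=
  (lines.foldl
    (fun (st : List (List String) × List String) line =>
      let line := remove_comment line
      if line == "," then (st.1 ++ [st.2], ([] : List String))
      else (st.1, st.2 ++ [line]))
    ([], [])).1

-- ===== PORT B =====
def parse_measures_alt (lines : List String) : List (List String) :=
  let cleaned := lines.map remove_comment
  ((PySem.List.enumerate cleaned 0).foldl
    (fun (st : List (List String) × Int) p =>
      if p.2 == "," then (st.1 ++ [PySem.List.slice cleaned (some st.2) (some p.1)], p.1 + 1)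
      else st)
    ([], 0)).1

-- ===== PRECONDITION & SPEC =====
def Spec_parse_measures (lines : List String) (out : List (List String)) : Prop := out = parse_measures_alt lines
instance (lines : List String) (out : List (List String)) : Decidable (Spec_parse_measures lines out) := by unfold Spec_parse_measures; infer_instance

-- ===== CLAIM (what is proved, stated in full; the proofs are below) =====
def Claim_equal_parse_measures : Prop := ∀ (lines : List String), Dom_parse_measures lines → Spec_parse_measures lines (parse_measures lines)

-- ===== LEMMAS AND PROOFS =====

-- A's loop body after the per-element cleaning has been factored out
def stepA (st : List (List String) × List String) (c : String) : List (List String) × List String :=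
  if c == "," then (st.1 ++ [st.2], ([] : List String)) else (st.1, st.2 ++ [c])

-- B's loop body over the enumerated cleaned list, for a fixed full cleaned list
def stepB (full : List String) (st : List (List String) × Int) (p : Int × String) :
    List (List String) × Int :=
  if p.2 == "," then (st.1 ++ [PySem.List.slice full (some st.2) (some p.1)], p.1 + 1) else st

-- Invariant: the pending accumulator of A is exactly full[start:k]
theorem main_inv (full : List String) :
    ∀ (rest : List String) (k start : Nat) (ms : List (List String)),
      rest = full.drop k → start ≤ k →
      ((PySem.List.enumerate rest (k : Int)).foldl (stepB full) (ms, (start : Int))).1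
        = (rest.foldl stepA (ms, (full.drop start).take (k - start))).1 := by
  intro rest
  induction rest with
  | nil => intro k start ms _ _; simp [PySem.List.enumerate]
  | cons c rest ih =>
    intro k start ms hrest hle
    have hget : full[k]? = some c := by
      have : (full.drop k)[0]? = some c := by rw [← hrest]; rfl
      simpa using this
    have hrest' : rest = full.drop (k + 1) := by
      have : (full.drop k).tail = full.drop (k + 1) := by
        exact List.tail_drop ..
      rw [← this, ← hrest]; rfl
    rw [PySem.List.enumerate_cons]
    simp only [List.foldl_cons]
    by_cases hc : c = ","
    · have hsB : stepB full (ms, (start : Int)) ((k : Int), c)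
          = (ms ++ [PySem.List.slice full (some (start : Int)) (some (k : Int))], (k : Int) + 1) := by
        simp [stepB, hc]
      have hsA : stepA (ms, (full.drop start).take (k - start)) c
          = (ms ++ [(full.drop start).take (k - start)], ([] : List String)) := by
        simp [stepA, hc]
      rw [hsB, hsA]
      have hslice : PySem.List.slice full (some (start : Int)) (some (k : Int))
          = (full.drop start).take (k - start) := PySem.List.slice_natCast ..
      rw [hslice]
      have hcast : (k : Int) + 1 = ((k + 1 : Nat) : Int) := by push_cast; ring
      rw [hcast]
      have := ih (k + 1) (k + 1) (ms ++ [(full.drop start).take (k - start)]) hrest' le_rfl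
      simpa using this
    · have hsB : stepB full (ms, (start : Int)) ((k : Int), c) = (ms, (start : Int)) := by
        simp [stepB, hc]
      have hsA : stepA (ms, (full.drop start).take (k - start)) c
          = (ms, (full.drop start).take (k - start) ++ [c]) := by
        simp [stepA, hc]
      rw [hsB, hsA]
      have hcast : (k : Int) + 1 = ((k + 1 : Nat) : Int) := by push_cast; ring
      rw [hcast]
      have htake : (full.drop start).take (k + 1 - start)
          = (full.drop start).take (k - start) ++ [c] := by
        have hidx : (full.drop start)[k - start]? = some c := by
          rw [List.getElem?_drop]
          have : start + (k - start) = k := by omega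
          rw [this, hget]
        have : k + 1 - start = (k - start) + 1 := by omega
        rw [this, List.take_add_one, hidx]
        rfl
      have := ih (k + 1) start ms hrest' (by omega)
      rw [← htake]
      simpa using this

-- the two ports, written through stepA/stepB
theorem portA_eq (lines : List String) :
    parse_measures lines = ((lines.map remove_comment).foldl stepA ([], [])).1 := by
  simp [parse_measures, List.foldl_map, stepA]

theorem portB_eq (lines : List String) :
    parse_measures_alt lines
      = ((PySem.List.enumerate (lines.map remove_comment) (0 : Int)).foldl
          (stepB (lines.map remove_comment)) ([], (0 : Int))).1 := by
  simp only [parse_measures_alt]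
  rfl

-- ===== VERDICT (by name: the statement is the Claim_ definition above) =====
theorem parse_measures_spec : Claim_equal_parse_measures := by
  intro lines _
  unfold Spec_parse_measures
  rw [portA_eq, portB_eq]
  have h := main_inv (lines.map remove_comment) (lines.map remove_comment) 0 0 [] (by simp) le_rfl
  simpa using h.symm
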